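-- pv_equiv track=rewrite | github.com/aphyer1992/dndsci-df | dnd_dwarves.py | list_teams
-- ===== SOURCE A (Python) =====
-- def list_teams(num_dwarves, profs_to_consider):
--     if num_dwarves == 0:
--         return([[]])
--
--     if len(profs_to_consider) == 0:
--         return([])
--
--     possibilities = []
--     num_first_prof = 0
--     while num_first_prof <= num_dwarves:
--         sub_perms = list_teams(num_dwarves - num_first_prof, profs_to_consider[1:])
--         prefix_list = [ profs_to_consider[0] ] * num_first_prof
--         possibilities = possibilities + [ prefix_list + p for p in sub_perms ]
--         num_first_prof = num_first_prof + 1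
--     return(possibilities)
-- ===== SOURCE B (Python) =====
-- from itertools import combinations_with_replacement
--
-- def list_teams(num_dwarves, profs_to_consider):
--     return [list(t) for t in reversed(list(combinations_with_replacement(profs_to_consider, num_dwarves)))]
-- ===== Notes on version B (the rewrite author's own statement) =====
-- stated objective: idiomatic
-- what changed: Replaced A's hand-rolled recursion over first-profession multiplicities (with quadratic list concatenation) by a single itertools.combinations_with_replacement call reversed, which enumerates the same multisets in exactly A's order.
-- outside the precondition, e.g. on list_teams(-1, ['a']): A returns [], B raises ValueError
import Mathlib
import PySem

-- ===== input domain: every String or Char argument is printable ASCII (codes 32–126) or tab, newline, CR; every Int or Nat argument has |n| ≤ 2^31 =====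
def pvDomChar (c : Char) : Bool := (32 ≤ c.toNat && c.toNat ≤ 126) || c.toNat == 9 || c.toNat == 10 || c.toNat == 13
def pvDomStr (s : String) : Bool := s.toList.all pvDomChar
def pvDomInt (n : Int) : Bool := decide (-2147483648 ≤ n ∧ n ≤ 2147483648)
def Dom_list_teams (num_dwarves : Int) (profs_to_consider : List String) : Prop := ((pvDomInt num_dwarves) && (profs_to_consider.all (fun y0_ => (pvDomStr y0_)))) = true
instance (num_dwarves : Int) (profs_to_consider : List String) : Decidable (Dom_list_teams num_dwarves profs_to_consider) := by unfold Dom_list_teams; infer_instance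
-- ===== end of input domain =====

-- B replaces A's hand-rolled recursion+accumulation by one itertools.combinations_with_replacement
-- call plus a reverse (idiomatic); return values proved equal for num_dwarves ≥ 0.

-- ===== PORT A =====
def list_teams (num_dwarves : Int) (profs_to_consider : List String) : List (List String) :=
  if num_dwarves == 0 then [[]]
  else
    match profs_to_consider with
    | [] => []
    | first :: rest =>
      -- while num_first_prof <= num_dwarves, step 1 from 0  ≡  for num_first_prof in range(num_dwarves+1)
      (PySem.List.pyRange 0 (num_dwarves + 1) 1).foldl
        (fun possibilities num_first_prof =>
          possibilities ++
            (list_teams (num_dwarves - num_first_prof) rest).map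
              (fun p => List.replicate num_first_prof.toNat first ++ p)) []
termination_by profs_to_consider.length
decreasing_by simp

-- ===== PORT B =====
-- itertools.combinations_with_replacement(pool, r) over a list pool, each tuple as a list,
-- in Python's lexicographic-by-position order (standard recursive characterisation).
def cwr : Nat → List String → List (List String)
  | 0, _ => [[]]
  | _ + 1, [] => []
  | n + 1, x :: xs => (cwr n (x :: xs)).map (fun t => x :: t) ++ cwr (n + 1) xs
termination_by n pool => (pool.length, n)

def list_teams_alt (num_dwarves : Int) (profs_to_consider : List String) : List (List String) :=
  (cwr num_dwarves.toNat profs_to_consider).reverse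

-- ===== PRECONDITION & SPEC =====
-- Pre_ excludes negative num_dwarves, where A returns [] but B's combinations_with_replacement
-- call raises ValueError (negative r); a team size is naturally a nonnegative count.
def Pre_list_teams (num_dwarves : Int) (profs_to_consider : List String) : Prop := 0 ≤ num_dwarves
instance (num_dwarves : Int) (profs_to_consider : List String) : Decidable (Pre_list_teams num_dwarves profs_to_consider) := by unfold Pre_list_teams; infer_instance
def pvWitness_list_teams : Int × List String := (2, ["a", "b"])
def Spec_list_teams (num_dwarves : Int) (profs_to_consider : List String) (out : List (List String)) : Prop := out = list_teams_alt num_dwarves profs_to_consider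
instance (num_dwarves : Int) (profs_to_consider : List String) (out : List (List String)) : Decidable (Spec_list_teams num_dwarves profs_to_consider out) := by unfold Spec_list_teams; infer_instance

-- ===== CLAIM (what is proved, stated in full; the proofs are below) =====
def Claim_equal_list_teams : Prop := ∀ (num_dwarves : Int) (profs_to_consider : List String), Dom_list_teams num_dwarves profs_to_consider → Pre_list_teams num_dwarves profs_to_consider → Spec_list_teams num_dwarves profs_to_consider (list_teams num_dwarves profs_to_consider)

-- ===== LEMMAS AND PROOFS =====

-- Reversed cwr over a cons pool splits by the multiplicity k of the first element, ascending.
theorem cwr_cons_reverse (x : String) (xs : List String) (n : Nat) :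
    (cwr n (x :: xs)).reverse =
      (List.range (n + 1)).flatMap
        (fun k => ((cwr (n - k) xs).reverse).map (fun p => List.replicate k x ++ p)) := by
  induction n with
  | zero => simp [cwr]
  | succ n ih =>
    rw [show (n + 1 + 1) = (n + 1) + 1 from rfl, List.range_succ_eq_map]
    simp only [cwr, List.reverse_append, ← List.map_reverse, ih, List.flatMap_cons,
      List.flatMap_map, List.map_flatMap]
    simp [List.replicate_succ, Function.comp_def, Nat.succ_sub_succ]

theorem list_teams_eq_cwr (profs : List String) :
    ∀ n : Nat, list_teams (n : Int) profs = (cwr n profs).reverse := by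
  induction profs with
  | nil =>
    intro n
    cases n with
    | zero => simp [list_teams, cwr]
    | succ n =>
      rw [list_teams]
      simp [cwr]
      omega
  | cons x xs ih =>
    intro n
    cases n with
    | zero => simp [list_teams, cwr]
    | succ n =>
      rw [list_teams, if_neg (by simp only [beq_iff_eq]; omega)]
      rw [show (((n + 1 : Nat) : Int) + 1) = ((n + 2 : Nat) : Int) by push_cast; ring,
        PySem.List.pyRange_zero_natCast, List.foldl_map]
      rw [PySem.List.foldl_congr_mem (List.range (n + 2)) _
        (fun acc k => acc ++ ((cwr (n + 1 - k) xs).reverse).map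
          (fun p => List.replicate k x ++ p)) []
        (by
          intro acc k hk
          have hk' : k ≤ n + 1 := by simpa [Nat.lt_succ_iff] using List.mem_range.mp hk
          have h1 : (((n + 1 : Nat) : Int) - (k : Int)) = ((n + 1 - k : Nat) : Int) := by
            push_cast [hk']; ring
          rw [h1, ih]
          simp)]
      rw [PySem.List.foldl_append_eq_flatMap, cwr_cons_reverse]
      simp

-- ===== VERDICT (by name: the statement is the Claim_ definition above) =====
theorem list_teams_spec : Claim_equal_list_teams := by
  intro num profs _ hpre
  unfold Pre_list_teams at hpre
  unfold Spec_list_teams list_teams_alt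
  have h : num = (num.toNat : Int) := by omega
  rw [h, list_teams_eq_cwr, Int.toNat_natCast]
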